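-- pv_equiv track=rewrite | github.com/fengbinzhu/Doc2SoarGraph | etr/test.py | get_index_num_date
-- ===== SOURCE A (Python) =====
-- def get_index_num_date(tags):
--     index=[]
--     begin=0
--     flag=0
--     for i,m in enumerate(tags):
--         if flag==0:
--             if m==1 or m==2:
--                 index.append(i)
--                 flag=1
--         if flag==1:
--             if m!=1 and m!=2:
--                 index.append(i)
--                 flag=0
--     return index
-- ===== SOURCE B (Python) =====
-- def get_index_num_date(tags):
--     index = []
--     n = len(tags)
--     i = 0
--     while True:
--         # seek the start of the next tag segment
--         while i < n and tags[i] != 1 and tags[i] != 2: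
--             i += 1
--         if i == n:
--             return index
--         index.append(i)
--         # seek past the end of this tag segment
--         while i < n and (tags[i] == 1 or tags[i] == 2):
--             i += 1
--         if i == n:
--             return index
--         index.append(i)
-- ===== Notes on version B (the rewrite author's own statement) =====
-- stated objective: alternative
-- what changed: Replaces A's per-element flag-machine scan with a run-oriented boundary seeker: an outer loop with two inner while-loops that skip a maximal non-tag run (emitting the segment start) and then a maximal tag run (emitting the segment end unless the list is exhausted).
import Mathlib
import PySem

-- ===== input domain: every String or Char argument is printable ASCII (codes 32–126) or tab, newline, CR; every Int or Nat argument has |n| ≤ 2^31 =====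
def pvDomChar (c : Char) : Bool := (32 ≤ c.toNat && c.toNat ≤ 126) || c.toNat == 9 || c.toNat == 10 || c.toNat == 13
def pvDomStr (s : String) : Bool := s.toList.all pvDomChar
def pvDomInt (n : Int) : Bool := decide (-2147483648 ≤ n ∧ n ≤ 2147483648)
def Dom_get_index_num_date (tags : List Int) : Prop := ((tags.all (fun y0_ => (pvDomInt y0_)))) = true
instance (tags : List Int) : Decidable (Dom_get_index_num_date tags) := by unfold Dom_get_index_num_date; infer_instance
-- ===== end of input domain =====

-- B replaces A's per-element flag-machine scan by a run-oriented boundary seeker: an outer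
-- loop that repeatedly skips a maximal non-tag run, emits the segment start, skips the
-- maximal tag run, and emits the segment end unless the list is exhausted (objective:
-- alternative decomposition); same return value on every input.

-- ===== PORT A =====
-- the loop body of A (one iteration of `for i,m in enumerate(tags)`)
def pvStepA (st : List Int × Int × Int) (im : Int × Int) : List Int × Int × Int :=
  let index := st.1
  let begin_ := st.2.1
  let flag := st.2.2
  let im1 := if flag = 0 then
      (if im.2 = 1 ∨ im.2 = 2 then (index ++ [im.1], (1 : Int)) else (index, flag))
    else (index, flag)
  let im2 := if im1.2 = 1 then
      (if im.2 ≠ 1 ∧ im.2 ≠ 2 then (im1.1 ++ [im.1], (0 : Int)) else im1)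
    else im1
  (im2.1, begin_, im2.2)

def get_index_num_date (tags : List Int) : List Int :=
  ((PySem.List.enumerate tags 0).foldl pvStepA ([], 0, 0)).1

-- ===== PORT B =====
-- `while i < n and tags[i] != 1 and tags[i] != 2: i += 1`  (fuel only totalizes; it never
-- runs out when called with fuel ≥ tags.length - i)
def pvSeekStart (tags : List Int) : Nat → Nat → Nat
  | 0, i => i
  | fuel + 1, i =>
    if i < tags.length ∧ tags.getD i 0 ≠ 1 ∧ tags.getD i 0 ≠ 2
    then pvSeekStart tags fuel (i + 1) else i

-- `while i < n and (tags[i] == 1 or tags[i] == 2): i += 1`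
def pvSeekEnd (tags : List Int) : Nat → Nat → Nat
  | 0, i => i
  | fuel + 1, i =>
    if i < tags.length ∧ (tags.getD i 0 = 1 ∨ tags.getD i 0 = 2)
    then pvSeekEnd tags fuel (i + 1) else i

-- the `while True` outer loop (fuel only totalizes: i strictly advances each round)
def pvLoopB (tags : List Int) : Nat → List Int → Nat → List Int
  | 0, index, _ => index
  | fuel + 1, index, i =>
    let s := pvSeekStart tags tags.length i
    if s = tags.length then index
    else
      let e := pvSeekEnd tags tags.length s
      if e = tags.length then index ++ [(s : Int)]
      else pvLoopB tags fuel (index ++ [(s : Int), (e : Int)]) e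

def get_index_num_date_alt (tags : List Int) : List Int :=
  pvLoopB tags (tags.length + 1) [] 0

-- ===== PRECONDITION & SPEC =====
def Spec_get_index_num_date (tags : List Int) (out : List Int) : Prop := out = get_index_num_date_alt tags
instance (tags : List Int) (out : List Int) : Decidable (Spec_get_index_num_date tags out) := by unfold Spec_get_index_num_date; infer_instance

-- ===== CLAIM (what is proved, stated in full; the proofs are below) =====
def Claim_equal_get_index_num_date : Prop := ∀ (tags : List Int), Dom_get_index_num_date tags → Spec_get_index_num_date tags (get_index_num_date tags)

-- ===== LEMMAS AND PROOFS =====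

def pvIsTag (m : Int) : Bool := m == 1 || m == 2

-- reference spec: mutual state machine emitting segment boundaries
mutual
def pvOut : Int → List Int → List Int
  | _, [] => []
  | i, m :: r => if pvIsTag m then i :: pvIn (i + 1) r else pvOut (i + 1) r
def pvIn : Int → List Int → List Int
  | _, [] => []
  | i, m :: r => if pvIsTag m then pvIn (i + 1) r else i :: pvOut (i + 1) r
end

theorem pvDropCons {tags : List Int} {i : Nat} {m : Int} {r : List Int}
    (hd : tags.drop i = m :: r) :
    i < tags.length ∧ tags.getD i 0 = m ∧ tags.drop (i + 1) = r := by
  have hlt : i < tags.length := by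
    by_contra hn
    rw [List.drop_eq_nil_of_le (by omega)] at hd
    simp at hd
  rw [List.drop_eq_getElem_cons hlt] at hd
  simp only [List.cons.injEq] at hd
  refine ⟨hlt, ?_, hd.2⟩
  rw [List.getD_eq_getElem?_getD, List.getElem?_eq_getElem hlt]
  simpa using hd.1

theorem pvStepA0 (acc : List Int) (beg s m : Int) :
    pvStepA (acc, beg, 0) (s, m) =
      if pvIsTag m then (acc ++ [s], beg, 1) else (acc, beg, 0) := by
  by_cases h1 : m = 1 <;> by_cases h2 : m = 2 <;> simp [pvStepA, pvIsTag, h1, h2]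

theorem pvStepA1 (acc : List Int) (beg s m : Int) :
    pvStepA (acc, beg, 1) (s, m) =
      if pvIsTag m then (acc, beg, 1) else (acc ++ [s], beg, 0) := by
  by_cases h1 : m = 1 <;> by_cases h2 : m = 2 <;> simp [pvStepA, pvIsTag, h1, h2]

theorem pvA_mut (tags : List Int) : ∀ (s : Int) (acc : List Int) (beg : Int),
    (((PySem.List.enumerate tags s).foldl pvStepA (acc, beg, 0)).1 = acc ++ pvOut s tags) ∧
    (((PySem.List.enumerate tags s).foldl pvStepA (acc, beg, 1)).1 = acc ++ pvIn s tags) := by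
  induction tags with
  | nil => intro s acc beg; simp [PySem.List.enumerate_nil, pvOut, pvIn]
  | cons m rest ih =>
    intro s acc beg
    constructor
    · rw [PySem.List.enumerate_cons, List.foldl_cons, pvStepA0]
      by_cases hm : pvIsTag m
      · rw [if_pos hm, (ih (s + 1) (acc ++ [s]) beg).2]
        simp [pvOut, hm]
      · rw [if_neg hm, (ih (s + 1) acc beg).1]
        simp [pvOut, hm]
    · rw [PySem.List.enumerate_cons, List.foldl_cons, pvStepA1]
      by_cases hm : pvIsTag m
      · rw [if_pos hm, (ih (s + 1) acc beg).2]
        simp [pvIn, hm]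
      · rw [if_neg hm, (ih (s + 1) (acc ++ [s]) beg).1]
        simp [pvIn, hm]

theorem pvSeekStart_eq (tags : List Int) : ∀ (rest : List Int) (i fuel : Nat),
    tags.drop i = rest → i ≤ tags.length → rest.length ≤ fuel →
    pvSeekStart tags fuel i = i + (rest.takeWhile (fun m => !pvIsTag m)).length := by
  intro rest
  induction rest with
  | nil =>
    intro i fuel hd hle _
    have : ¬ i < tags.length := by
      intro hlt
      have := List.drop_eq_nil_iff.mp hd
      omega
    cases fuel with
    | zero => simp [pvSeekStart]
    | succ f => simp [pvSeekStart, this]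
  | cons m r ih =>
    intro i fuel hd hle hf
    obtain ⟨hlt, hget, hdr⟩ := pvDropCons hd
    cases fuel with
    | zero => exact absurd hf (by simp)
    | succ f =>
      by_cases hm : pvIsTag m
      · have hcond : ¬ (i < tags.length ∧ tags.getD i 0 ≠ 1 ∧ tags.getD i 0 ≠ 2) := by
          rw [hget]
          simp only [pvIsTag] at hm
          rcases (by simpa using hm : m = 1 ∨ m = 2) with h | h <;> simp [h]
        simp only [pvSeekStart]
        rw [if_neg hcond]
        simp [List.takeWhile_cons, hm]
      · have hcond : i < tags.length ∧ tags.getD i 0 ≠ 1 ∧ tags.getD i 0 ≠ 2 := by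
          rw [hget]
          simp only [pvIsTag, Bool.or_eq_true, beq_iff_eq, not_or] at hm
          push Not at hm
          exact ⟨hlt, hm.1, hm.2⟩
        rw [pvSeekStart, if_pos hcond,
          ih (i + 1) f hdr (by omega) (by simpa using hf)]
        simp [List.takeWhile_cons, hm]
        omega

theorem pvSeekEnd_eq (tags : List Int) : ∀ (rest : List Int) (i fuel : Nat),
    tags.drop i = rest → i ≤ tags.length → rest.length ≤ fuel →
    pvSeekEnd tags fuel i = i + (rest.takeWhile (fun m => pvIsTag m)).length := by
  intro rest
  induction rest with
  | nil =>
    intro i fuel hd hle _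
    have : ¬ i < tags.length := by
      intro hlt
      have := List.drop_eq_nil_iff.mp hd
      omega
    cases fuel with
    | zero => simp [pvSeekEnd]
    | succ f => simp [pvSeekEnd, this]
  | cons m r ih =>
    intro i fuel hd hle hf
    obtain ⟨hlt, hget, hdr⟩ := pvDropCons hd
    cases fuel with
    | zero => exact absurd hf (by simp)
    | succ f =>
      by_cases hm : pvIsTag m
      · have hcond : i < tags.length ∧ (tags.getD i 0 = 1 ∨ tags.getD i 0 = 2) := by
          rw [hget]
          simp only [pvIsTag, Bool.or_eq_true, beq_iff_eq] at hm
          exact ⟨hlt, hm⟩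
        rw [pvSeekEnd, if_pos hcond,
          ih (i + 1) f hdr (by omega) (by simpa using hf)]
        simp [List.takeWhile_cons, hm]
        omega
      · have hcond : ¬ (i < tags.length ∧ (tags.getD i 0 = 1 ∨ tags.getD i 0 = 2)) := by
          rw [hget]
          simp only [pvIsTag, Bool.or_eq_true, beq_iff_eq] at hm
          tauto
        simp only [pvSeekEnd]
        rw [if_neg hcond]
        simp [List.takeWhile_cons, hm]

theorem pvOut_skip (i : Int) (l₁ l₂ : List Int) (h : ∀ m ∈ l₁, ¬ pvIsTag m = true) :
    pvOut i (l₁ ++ l₂) = pvOut (i + l₁.length) l₂ := by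
  induction l₁ generalizing i with
  | nil => simp
  | cons m r ih =>
    have hm := h m (by simp)
    rw [List.cons_append, pvOut, if_neg hm, ih (i + 1) (fun x hx => h x (by simp [hx]))]
    congr 1
    push_cast [List.length_cons]
    ring

theorem pvIn_skip (i : Int) (l₁ l₂ : List Int) (h : ∀ m ∈ l₁, pvIsTag m = true) :
    pvIn i (l₁ ++ l₂) = pvIn (i + l₁.length) l₂ := by
  induction l₁ generalizing i with
  | nil => simp
  | cons m r ih =>
    have hm := h m (by simp)
    rw [List.cons_append, pvIn, if_pos hm, ih (i + 1) (fun x hx => h x (by simp [hx]))]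
    congr 1
    push_cast [List.length_cons]
    ring

theorem pvDropWhileHead (p : Int → Bool) : ∀ (l : List Int) (m : Int) (r : List Int),
    l.dropWhile p = m :: r → p m = false := by
  intro l
  induction l with
  | nil => intro m r h; simp [List.dropWhile] at h
  | cons a t ih =>
    intro m r h
    by_cases hp : p a
    · rw [List.dropWhile_cons, if_pos hp] at h
      exact ih _ _ h
    · rw [List.dropWhile_cons, if_neg hp] at h
      simp only [List.cons.injEq] at h
      rw [h.1] at hp
      simpa using hp

theorem pvLoopB_eq (tags : List Int) : ∀ (k : Nat) (rest : List Int) (i fuel : Nat)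
    (acc : List Int), rest.length ≤ k → tags.drop i = rest → i ≤ tags.length →
    rest.length < fuel →
    pvLoopB tags fuel acc i = acc ++ pvOut (i : Int) rest := by
  intro k
  induction k with
  | zero =>
    intro rest i fuel acc hk hd hle hf
    have h0 : rest = [] := List.length_eq_zero_iff.mp (by omega)
    subst h0
    have hi : i = tags.length := by
      have := List.drop_eq_nil_iff.mp hd; omega
    cases fuel with
    | zero => omega
    | succ f =>
      subst hi
      have hs : pvSeekStart tags tags.length tags.length = tags.length := by
        rw [pvSeekStart_eq tags [] tags.length tags.length hd (le_refl _) (by simp)]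
        simp
      simp only [pvLoopB]
      rw [if_pos hs]
      simp [pvOut]
  | succ k ih =>
    intro rest i fuel acc hk hd hle hf
    cases fuel with
    | zero => omega
    | succ f =>
      have hrl : rest.length = tags.length - i := by
        rw [← hd]; simp
      -- split rest into its leading non-tag run and the remainder
      set T1 := rest.takeWhile (fun m => !pvIsTag m) with hT1
      set rest' := rest.dropWhile (fun m => !pvIsTag m) with hrest'
      have hsplit : rest = T1 ++ rest' := (List.takeWhile_append_dropWhile).symm
      have hT1all : ∀ m ∈ T1, ¬ pvIsTag m = true := by
        intro m hm
        have := List.mem_takeWhile_imp hm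
        simpa using this
      have hs := pvSeekStart_eq tags rest i tags.length hd hle (by omega)
      rw [pvLoopB]
      by_cases hsend : i + T1.length = tags.length
      · -- no further segment: rest is all non-tags
        have hrest0 : rest' = [] := by
          have : T1.length ≤ rest.length := by
            rw [hsplit]; simp
          have : rest'.length = 0 := by
            have hlen : rest.length = T1.length + rest'.length := by
              rw [hsplit]; simp
            omega
          exact List.length_eq_zero_iff.mp this
        rw [if_pos (by rw [hs, ← hT1]; omega)]
        rw [hsplit, hrest0, pvOut_skip _ _ _ hT1all, pvOut]
        simp
      · rw [if_neg (by rw [hs, ← hT1]; omega)]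
        -- rest' = m :: r with pvIsTag m
        have hrne : rest' ≠ [] := by
          intro h0
          have hlen : rest.length = T1.length + rest'.length := by
            rw [hsplit]; simp
          rw [h0] at hlen
          simp at hlen
          omega
        obtain ⟨m, r, hmr⟩ := List.exists_cons_of_ne_nil hrne
        have hmtag : pvIsTag m = true := by
          have := pvDropWhileHead (fun m => !pvIsTag m) rest m r (by rw [← hrest']; exact hmr)
          simpa using this
        set s := i + T1.length with hsdef
        have hds : tags.drop s = rest' := by
          have h1 : (tags.drop i).drop T1.length = rest' := by
            rw [hd, hsplit]
            simp
          rw [List.drop_drop] at h1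
          exact h1
        have hsle : s ≤ tags.length := by
          have : T1.length + rest'.length = rest.length := by rw [hsplit]; simp
          omega
        -- leading tag run of rest'
        set T2 := rest'.takeWhile (fun m => pvIsTag m) with hT2
        set rest'' := rest'.dropWhile (fun m => pvIsTag m) with hrest''
        have hsplit2 : rest' = T2 ++ rest'' := (List.takeWhile_append_dropWhile).symm
        have hT2all : ∀ x ∈ T2, pvIsTag x = true := by
          intro x hx
          exact List.mem_takeWhile_imp hx
        have hT2pos : 0 < T2.length := by
          rw [hT2, hmr]
          simp [List.takeWhile_cons, hmtag]
        have he := pvSeekEnd_eq tags rest' s tags.length hds hsle (by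
          have : rest'.length ≤ rest.length := by rw [hsplit]; simp
          omega)
        set e := s + T2.length with hedef
        have hlen' : rest'.length = T2.length + rest''.length := by
          rw [hsplit2]; simp
        have hout : pvOut (i : Int) rest = (s : Int) :: pvIn ((s : Int) + 1) (T2.tail ++ rest'') := by
          rw [hsplit, pvOut_skip _ _ _ hT1all]
          have hc : ((i : Int) + (T1.length : Int)) = (s : Int) := by
            rw [hsdef]; push_cast; ring
          rw [hc, hsplit2]
          obtain ⟨T2', hT2'⟩ : ∃ T2', T2 = m :: T2' := by
            refine ⟨r.takeWhile (fun m => pvIsTag m), ?_⟩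
            rw [hT2, hmr]
            simp [List.takeWhile_cons, hmtag]
          rw [hT2', List.cons_append, pvOut, if_pos hmtag]
          simp [hT2']
        have hin : pvIn ((s : Int) + 1) (T2.tail ++ rest'') = pvIn (e : Int) rest'' := by
          rw [pvIn_skip _ _ _ (fun x hx => hT2all x (List.mem_of_mem_tail hx))]
          congr 1
          have : T2.tail.length = T2.length - 1 := by simp
          rw [this, hedef]
          push_cast [Nat.cast_sub (by omega : 1 ≤ T2.length)]
          ring
        have hlen0 : rest.length = T1.length + rest'.length := by
          rw [hsplit]; simp
        by_cases hee : e = tags.length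
        · -- segment runs to the end: no closing index
          have hrest''0 : rest'' = [] := by
            have : rest.length = T1.length + T2.length + rest''.length := by omega
            have : rest''.length = 0 := by omega
            exact List.length_eq_zero_iff.mp this
          rw [if_pos (by rw [hs, he]; omega)]
          rw [hout, hin, hrest''0, pvIn]
          simp [hs, ← hT1, hsdef]
        · rw [if_neg (by rw [hs, he]; omega)]
          rw [hs, he]
          -- rest'' = m' :: r'' with ¬pvIsTag m'
          have hrne'' : rest'' ≠ [] := by
            intro h0
            have : rest.length = T1.length + T2.length + rest''.length := by omega
            rw [h0] at this
            simp at this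
            omega
          obtain ⟨m', r'', hmr''⟩ := List.exists_cons_of_ne_nil hrne''
          have hmnt : ¬ pvIsTag m' = true := by
            have := pvDropWhileHead (fun m => pvIsTag m) rest' m' r'' (by rw [← hrest'']; exact hmr'')
            simp [this]
          have hde : tags.drop e = rest'' := by
            have h1 : tags.drop s = rest' := hds
            have h2 : (tags.drop s).drop T2.length = rest'' := by
              rw [h1, hsplit2]; simp
            rw [List.drop_drop] at h2
            exact h2
          have hele : e ≤ tags.length := by
            have : rest.length = T1.length + T2.length + rest''.length := by omega
            omega
          rw [ih rest'' e f (acc ++ [(s : Int), (e : Int)])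
            (by omega) hde hele (by omega)]
          rw [hout, hin, hmr'', pvIn, if_neg hmnt]
          simp [hs, ← hT1, hsdef, he, ← hT2, hedef]
          rw [pvOut, if_neg hmnt]

theorem pvAeqB (tags : List Int) : get_index_num_date tags = get_index_num_date_alt tags := by
  unfold get_index_num_date get_index_num_date_alt
  rw [(pvA_mut tags 0 [] 0).1,
    pvLoopB_eq tags tags.length tags 0 (tags.length + 1) [] (by simp) (by simp)
      (by omega) (by simp)]
  norm_num

-- ===== VERDICT (by name: the statement is the Claim_ definition above) =====
theorem get_index_num_date_spec : Claim_equal_get_index_num_date := by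
  intro tags _
  exact pvAeqB tags
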